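-- pv_equiv track=rewrite | github.com/DioCrafts/qualitycode | src/codeant_agent/infrastructure/explanation/language_adapter.py | _apply_english_cultural_adaptations
-- ===== SOURCE A (Python) =====
-- def _apply_english_cultural_adaptations(content: str) -> str:
--     """Aplicar adaptaciones culturales para inglés."""
--     # Usar tono directo y profesional
--     adaptations = {
--         "Hola": "Hello",
--         "Estimado/a": "Dear",
--         "Saludos cordiales": "Best regards",
--         "Gracias": "Thank you",
--         "Por favor": "Please",
--         "Disculpe": "Sorry",
--         "Perdón": "Excuse me",
--         "muy importante": "very important",
--         "importante": "important",
--         "recomendado": "recommended"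
--     }
--
--     adapted_content = content
--     for spanish, english in adaptations.items():
--         adapted_content = adapted_content.replace(spanish, english)
--
--     return adapted_content
-- ===== SOURCE B (Python) =====
-- def _apply_english_cultural_adaptations(content: str) -> str:
--     """Aplicar adaptaciones culturales para inglés."""
--     adaptations = [
--         ("Hola", "Hello"),
--         ("Estimado/a", "Dear"),
--         ("Saludos cordiales", "Best regards"),
--         ("Gracias", "Thank you"),
--         ("Por favor", "Please"),
--         ("Disculpe", "Sorry"),
--         ("Perdón", "Excuse me"),
--         ("muy importante", "very important"),
--         ("importante", "important"),
--         ("recomendado", "recommended"),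
--     ]
--     out = []
--     i = 0
--     n = len(content)
--     while i < n:
--         for spanish, english in adaptations:
--             if content.startswith(spanish, i):
--                 out.append(english)
--                 i += len(spanish)
--                 break
--         else:
--             out.append(content[i])
--             i += 1
--     return "".join(out)
-- ===== Notes on version B (the rewrite author's own statement) =====
-- stated objective: alternative
-- what changed: A runs ten sequential full-string str.replace passes (one per dictionary entry, each rescanning the whole intermediate string, including text produced by earlier substitutions); B walks the original string once left-to-right, at each position emitting the English value of the first table phrase that starts there (or the character itself), so each input character is translated at most once.
-- intended difference: On content containing "muy importantee" or "Estimado/aecomendado", A's later passes rescan text produced by earlier substitutions and corrupt it (A turns "muy importantee" into "very important", eating the trailing e, and "Estimado/aecomendado" into "Dearecommended"), while B returns "very importante" resp. "Dearecomendado", translating only phrases present in the original text, which is the intended behaviour. — e.g. on _apply_english_cultural_adaptations("muy importantee"): A returns "very important", B returns "very importante"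
import Mathlib
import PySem

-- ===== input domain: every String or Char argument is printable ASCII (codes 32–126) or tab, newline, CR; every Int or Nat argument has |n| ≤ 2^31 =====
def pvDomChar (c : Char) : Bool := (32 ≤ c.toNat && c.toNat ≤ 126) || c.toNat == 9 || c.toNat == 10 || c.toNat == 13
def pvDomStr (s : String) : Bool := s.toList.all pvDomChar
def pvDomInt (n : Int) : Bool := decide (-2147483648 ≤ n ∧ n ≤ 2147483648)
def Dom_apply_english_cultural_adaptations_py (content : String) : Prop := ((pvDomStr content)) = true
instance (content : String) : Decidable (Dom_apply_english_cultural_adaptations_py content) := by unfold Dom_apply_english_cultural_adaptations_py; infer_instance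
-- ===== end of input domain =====

-- B replaces A's ten sequential full-string replace passes by a single left-to-right scan with a
-- first-match rule over the same ordered table (objective: alternative single-pass algorithm); on the
-- exceptional D_ inputs where A's passes cascade, B's non-cascading output is the intended one.

-- ===== PORT A =====
-- the dict literal, as an association list in insertion order; the loop over .items() is a foldl
def pvAdaptationsA : List (String × String) :=
  [("Hola", "Hello"),
   ("Estimado/a", "Dear"),
   ("Saludos cordiales", "Best regards"),
   ("Gracias", "Thank you"),
   ("Por favor", "Please"),
   ("Disculpe", "Sorry"),
   ("Perdón", "Excuse me"),
   ("muy importante", "very important"),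
   ("importante", "important"),
   ("recomendado", "recommended")]

def apply_english_cultural_adaptations_py (content : String) : String :=
  List.foldl (fun adapted_content kv => PySem.Str.replace adapted_content kv.1 kv.2)
    content pvAdaptationsA

-- ===== PORT B =====
-- the same table, on the character-list side, for the single scan
def pvPairs : List (List Char × List Char) :=
  [("Hola".toList, "Hello".toList),
   ("Estimado/a".toList, "Dear".toList),
   ("Saludos cordiales".toList, "Best regards".toList),
   ("Gracias".toList, "Thank you".toList),
   ("Por favor".toList, "Please".toList),
   ("Disculpe".toList, "Sorry".toList),
   ("Perdón".toList, "Excuse me".toList),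
   ("muy importante".toList, "very important".toList),
   ("importante".toList, "important".toList),
   ("recomendado".toList, "recommended".toList)]

-- content.startswith(spanish, i) over the pair table, first match (the for/break of Source B)
def pvFind (s : List Char) : List (List Char × List Char) → Option (List Char × List Char)
  | [] => none
  | kv :: rest => if kv.1.isPrefixOf s then some kv else pvFind s rest

theorem pvFind_mem {s : List Char} {L : List (List Char × List Char)} {kv : List Char × List Char}
    (h : pvFind s L = some kv) : kv ∈ L := by
  induction L with
  | nil => simp [pvFind] at h
  | cons p rest ih =>
    by_cases hp : p.1.isPrefixOf s
    · simp [pvFind, hp] at h; simp [h]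
    · simp [pvFind, hp] at h; exact List.mem_cons_of_mem _ (ih h)

theorem pvPairs_key_pos : ∀ kv ∈ pvPairs, 0 < kv.1.length := by decide

-- the while loop of Source B: walk the string once, emitting either a table value or the current char
def pvScan (s : List Char) : List Char :=
  match s with
  | [] => []
  | c :: t =>
    match hf : pvFind (c :: t) pvPairs with
    | some kv => kv.2 ++ pvScan ((c :: t).drop kv.1.length)
    | none => c :: pvScan t
termination_by s.length
decreasing_by
  all_goals simp [List.length_drop] <;> (have hk := pvPairs_key_pos kv (pvFind_mem hf); omega)

def apply_english_cultural_adaptations_py_alt (content : String) : String :=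
  String.ofList (pvScan content.toList)

-- ===== PRECONDITION & SPEC =====
-- On content containing "muy importantee" or "Estimado/aecomendado", A's later passes rescan the text
-- produced by earlier passes ("muy importantee" → "very importante" → "very important",
-- "Estimado/aecomendado" → "Dearecomendado" → "Dearecommended"), silently rewriting characters that
-- were never a Spanish phrase of the table; B translates each phrase of the original text exactly once,
-- which is the intended behaviour.
def D_apply_english_cultural_adaptations_py (content : String) : Prop :=
  PySem.Str.isIn "muy importantee" content = true ∨
  PySem.Str.isIn "Estimado/aecomendado" content = true
instance (content : String) : Decidable (D_apply_english_cultural_adaptations_py content) := by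
  unfold D_apply_english_cultural_adaptations_py; infer_instance

def Spec_apply_english_cultural_adaptations_py (content : String) (out : String) : Prop :=
  ¬ D_apply_english_cultural_adaptations_py content → out = apply_english_cultural_adaptations_py_alt content
instance (content : String) (out : String) : Decidable (Spec_apply_english_cultural_adaptations_py content out) := by
  unfold Spec_apply_english_cultural_adaptations_py; infer_instance

def pvDiffWitness_apply_english_cultural_adaptations_py : String := "muy importantee"
def pvDiffWitnessOut_apply_english_cultural_adaptations_py : String × String :=
  ("very important", "very importante")

-- ===== CLAIM (what is proved, stated in full; the proofs are below) =====
def Claim_unchanged_apply_english_cultural_adaptations_py : Prop := ∀ (content : String), Dom_apply_english_cultural_adaptations_py content → Spec_apply_english_cultural_adaptations_py content (apply_english_cultural_adaptations_py content)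
def Claim_exact_apply_english_cultural_adaptations_py : Prop := ∀ (content : String), Dom_apply_english_cultural_adaptations_py content → D_apply_english_cultural_adaptations_py content → apply_english_cultural_adaptations_py content ≠ apply_english_cultural_adaptations_py_alt content
def Claim_changed_apply_english_cultural_adaptations_py : Prop := Dom_apply_english_cultural_adaptations_py (pvDiffWitness_apply_english_cultural_adaptations_py) ∧ D_apply_english_cultural_adaptations_py (pvDiffWitness_apply_english_cultural_adaptations_py) ∧ apply_english_cultural_adaptations_py (pvDiffWitness_apply_english_cultural_adaptations_py) = pvDiffWitnessOut_apply_english_cultural_adaptations_py.1 ∧ apply_english_cultural_adaptations_py_alt (pvDiffWitness_apply_english_cultural_adaptations_py) = pvDiffWitnessOut_apply_english_cultural_adaptations_py.2 ∧ pvDiffWitnessOut_apply_english_cultural_adaptations_py.1 ≠ pvDiffWitnessOut_apply_english_cultural_adaptations_py.2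

-- ===== LEMMAS AND PROOFS =====

-- unfueled form of Python str.replace (nonempty pattern): the scan PySem.Chars.replace.go performs
def pvRep (k v : List Char) : List Char → List Char
  | [] => []
  | c :: t => if k.isPrefixOf (c :: t) then v ++ pvRep k v (t.drop (k.length - 1)) else c :: pvRep k v t
termination_by s => s.length
decreasing_by
  all_goals simp [List.length_drop]

theorem pvRep_go (k v : List Char) (hk : k ≠ []) :
    ∀ (fuel : Nat) (l : List Char), l.length ≤ fuel → ∀ acc,
      PySem.Chars.replace.go k v fuel l acc = acc.reverse ++ pvRep k v l := by
  intro fuel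
  induction fuel with
  | zero =>
    intro l hl acc
    have : l = [] := by cases l <;> simp_all
    subst this
    simp [PySem.Chars.replace.go, pvRep]
  | succ fuel ih =>
    intro l hl acc
    cases l with
    | nil => simp [PySem.Chars.replace.go, pvRep]
    | cons c t =>
      by_cases hpre : k.isPrefixOf (c :: t)
      · have hkl : 1 ≤ k.length := by cases k <;> simp_all
        have hdrop : (c :: t).drop k.length = t.drop (k.length - 1) := by
          cases k with
          | nil => simp_all
          | cons a k' => simp
        rw [show PySem.Chars.replace.go k v (fuel + 1) (c :: t) acc
              = PySem.Chars.replace.go k v fuel ((c :: t).drop k.length) (v.reverse ++ acc) from by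
            simp [PySem.Chars.replace.go, hpre]]
        rw [ih _ (by simp at hl; simp [List.length_drop]; omega) _]
        rw [show pvRep k v (c :: t) = v ++ pvRep k v (t.drop (k.length - 1)) from by
            simp [pvRep, hpre]]
        simp [hdrop]
      · rw [show PySem.Chars.replace.go k v (fuel + 1) (c :: t) acc
              = PySem.Chars.replace.go k v fuel t (c :: acc) from by
            simp [PySem.Chars.replace.go, hpre]]
        rw [ih _ (by simp at hl ⊢; omega) _]
        rw [show pvRep k v (c :: t) = c :: pvRep k v t from by simp [pvRep, hpre]]
        simp

theorem pvReplace_eq_rep (k v s : List Char) (hk : k ≠ []) :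
    PySem.Chars.replace s k v = pvRep k v s := by
  have hke : k.isEmpty = false := by cases k <;> simp_all
  rw [PySem.Chars.replace, hke]
  simpa using pvRep_go k v hk s.length s le_rfl []

-- one pass of the A-side fold
def pvFrep (acc : List Char) (kv : List Char × List Char) : List Char := pvRep kv.1 kv.2 acc

-- A's whole pipeline on the character-list side
def pvFl (t : List Char) : List Char := List.foldl pvFrep t pvPairs

theorem pvFoldA (L : List (String × String)) (hL : ∀ kv ∈ L, kv.1 ≠ "") :
    ∀ s : String,
      (List.foldl (fun acc kv => PySem.Str.replace acc kv.1 kv.2) s L).toList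
        = List.foldl pvFrep s.toList (L.map (fun kv => (kv.1.toList, kv.2.toList))) := by
  induction L with
  | nil => intro s; simp
  | cons kv rest ih =>
    intro s
    have hk : kv.1.toList ≠ [] := by
      intro h0
      exact hL kv List.mem_cons_self (by
        have := congrArg String.ofList h0
        simpa using this)
    rw [List.foldl_cons, ih (fun kv' hm => hL kv' (List.mem_cons_of_mem _ hm))]
    simp only [List.map_cons, List.foldl_cons, pvFrep]
    congr 1
    rw [show (PySem.Str.replace s kv.1 kv.2).toList
          = PySem.Chars.replace s.toList kv.1.toList kv.2.toList from by
        simp [PySem.Str.replace]]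
    exact pvReplace_eq_rep _ _ _ hk

theorem pvA_toList (content : String) :
    (apply_english_cultural_adaptations_py content).toList = pvFl content.toList := by
  rw [apply_english_cultural_adaptations_py, pvFoldA pvAdaptationsA (by decide) content]
  rw [show pvAdaptationsA.map (fun kv => (kv.1.toList, kv.2.toList)) = pvPairs from by decide]
  rfl

theorem pvRep_nil (k v : List Char) : pvRep k v [] = [] := by simp [pvRep]

theorem pvRep_match {k : List Char} (v : List Char) {s : List Char} (hk : k ≠ []) (h : k <+: s) :
    pvRep k v s = v ++ pvRep k v (s.drop k.length) := by
  cases s with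
  | nil =>
    exact absurd (List.prefix_nil.mp h) hk
  | cons c t =>
    have hpre : k.isPrefixOf (c :: t) = true := by
      rw [List.isPrefixOf_iff_prefix]; exact h
    have hdrop : (c :: t).drop k.length = t.drop (k.length - 1) := by
      cases k with
      | nil => simp_all
      | cons a k' => simp
    rw [show pvRep k v (c :: t) = v ++ pvRep k v (t.drop (k.length - 1)) from by
        simp [pvRep, hpre], hdrop]

theorem pvRep_skip {k : List Char} (v : List Char) {c : Char} {t : List Char}
    (h : ¬ k <+: (c :: t)) : pvRep k v (c :: t) = c :: pvRep k v t := by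
  have hpre : k.isPrefixOf (c :: t) = false := by
    rw [Bool.eq_false_iff, ne_eq, List.isPrefixOf_iff_prefix]; exact h
  simp [pvRep, hpre]

-- occurrence decomposition at a list boundary
theorem pvPrefix_append_split {k a X : List Char} (h : k <+: a ++ X) :
    k <+: a ∨ (a <+: k ∧ k.drop a.length <+: X) := by
  rcases List.prefix_or_prefix_of_prefix h (List.prefix_append a X) with h1 | h1
  · exact Or.inl h1
  · refine Or.inr ⟨h1, ?_⟩
    obtain ⟨r, rfl⟩ := h1
    simpa using (List.prefix_append_right_inj a).mp h

-- push a pattern-free block through one replace pass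
theorem pvPush (k v : List Char) (u X : List Char)
    (H : ∀ d, d < u.length → ¬ k <+: (u.drop d ++ X)) :
    pvRep k v (u ++ X) = u ++ pvRep k v X := by
  induction u with
  | nil => simp
  | cons a u' ih =>
    have h0 : ¬ k <+: (a :: (u' ++ X)) := by simpa using H 0 (by simp)
    rw [List.cons_append, pvRep_skip v h0, ih (fun d hd => by simpa using H (d + 1) (by simp; omega))]
    simp

-- static version: no suffix of u can start an occurrence of k, whatever follows
theorem pvPushStatic (k v : List Char) (u X : List Char)
    (H : ∀ d, d < u.length → ¬ k <+: u.drop d ∧ ¬ u.drop d <+: k) :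
    pvRep k v (u ++ X) = u ++ pvRep k v X := by
  refine pvPush k v u X (fun d hd hk => ?_)
  rcases pvPrefix_append_split hk with h1 | ⟨h1, _⟩
  · exact (H d hd).1 h1
  · exact (H d hd).2 h1

-- a prefix not containing the head of the substituted value reflects back to the source string
theorem pvRefl (k v : List Char) (a : Char) (hv : v.head? = some a) :
    ∀ (r p : List Char), a ∉ p → p <+: pvRep k v r → p <+: r := by
  obtain ⟨a', v', rfl⟩ : ∃ a' v', v = a' :: v' := by
    cases v with
    | nil => simp at hv
    | cons a' v' => exact ⟨a', v', rfl⟩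
  have ha : a' = a := by simpa using hv
  subst ha
  intro r
  induction r with
  | nil =>
    intro p hp h
    simpa [pvRep] using h
  | cons c t ih =>
    intro p hp h
    by_cases hpre : k.isPrefixOf (c :: t)
    · rw [show pvRep k (a' :: v') (c :: t) = (a' :: v') ++ pvRep k (a' :: v') (t.drop (k.length - 1))
          from by simp [pvRep, hpre]] at h
      cases p with
      | nil => exact List.nil_prefix
      | cons b p' =>
        have hb : b = a' := (List.cons_prefix_cons.mp h).1
        exact absurd (by simp [hb]) hp
    · rw [show pvRep k (a' :: v') (c :: t) = c :: pvRep k (a' :: v') t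
          from by simp [pvRep, hpre]] at h
      cases p with
      | nil => exact List.nil_prefix
      | cons b p' =>
        obtain ⟨hb, hp'⟩ := List.cons_prefix_cons.mp h
        exact List.cons_prefix_cons.mpr ⟨hb, ih p' (fun hm => hp (by simp [hm])) hp'⟩

-- ... and through a whole prefix of the pipeline
theorem pvChain {p : List Char} (L : List (List Char × List Char))
    (hL : ∀ kv ∈ L, kv.2 ≠ [] ∧ kv.2.headI ∉ p) :
    ∀ t, p <+: List.foldl pvFrep t L → p <+: t := by
  induction L with
  | nil => intro t h; simpa using h
  | cons kv rest ih =>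
    intro t h
    rw [List.foldl_cons] at h
    obtain ⟨hne, hbp⟩ := hL kv (List.mem_cons_self)
    have hb : kv.2.head? = some kv.2.headI := by
      cases h2 : kv.2 with
      | nil => exact absurd h2 hne
      | cons x xs => simp [h2]
    exact pvRefl kv.1 kv.2 kv.2.headI hb t p hbp
      (ih (fun kv' hm => hL kv' (List.mem_cons_of_mem _ hm)) _ h)

-- the two data-dependent boundary pushes
theorem pvPush_e (X : List Char) (hX : ¬ ['e'] <+: X) :
    pvRep "importante".toList "important".toList ("very important".toList ++ X)
      = "very important".toList ++ pvRep "importante".toList "important".toList X := by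
  refine pvPush _ _ _ _ (fun d hd => ?_)
  rw [show "very important".toList = ['v','e','r','y',' ','i','m','p','o','r','t','a','n','t'] from by decide] at hd ⊢
  rw [show "importante".toList = ['i','m','p','o','r','t','a','n','t','e'] from by decide]
  simp only [List.length_cons, List.length_nil] at hd
  interval_cases d <;> simp_all [List.cons_prefix_cons]

theorem pvPush_Dear (X : List Char) (hX : ¬ "ecomendado".toList <+: X) :
    pvRep "recomendado".toList "recommended".toList ("Dear".toList ++ X)
      = "Dear".toList ++ pvRep "recomendado".toList "recommended".toList X := by
  have he : "ecomendado".toList = ['e','c','o','m','e','n','d','a','d','o'] := by decide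
  rw [he] at hX
  refine pvPush _ _ _ _ (fun d hd => ?_)
  rw [show "Dear".toList = ['D','e','a','r'] from by decide] at hd ⊢
  rw [show "recomendado".toList = ['r','e','c','o','m','e','n','d','a','d','o'] from by decide]
  simp only [List.length_cons, List.length_nil] at hd
  interval_cases d <;> simp_all [List.cons_prefix_cons]

-- goodness: the strings on which the pipelines agree
def pvGood (t : List Char) : Prop :=
  ¬ ("muy importantee".toList <:+: t) ∧ ¬ ("Estimado/aecomendado".toList <:+: t)

theorem pvGood_sublist {s t : List Char} (h : t <:+: s) (hg : pvGood s) : pvGood t := by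
  exact ⟨fun h1 => hg.1 (h1.trans h), fun h2 => hg.2 (h2.trans h)⟩

theorem pvRep_match_append (k v r : List Char) (hk : k ≠ []) :
    pvRep k v (k ++ r) = v ++ pvRep k v r := by
  rw [pvRep_match v hk (List.prefix_append _ _), List.drop_left]

-- pvFind = none means no key of the table is a prefix
theorem pvFind_none {s : List Char} {L : List (List Char × List Char)}
    (h : pvFind s L = none) : ∀ kv ∈ L, ¬ kv.1 <+: s := by
  induction L with
  | nil => simp
  | cons p rest ih =>
    by_cases hp : p.1.isPrefixOf s
    · simp [pvFind, hp] at h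
    · intro kv hm
      rcases List.mem_cons.mp hm with rfl | hm'
      · simpa [List.isPrefixOf_iff_prefix] using hp
      · exact ih (by simpa [pvFind, hp] using h) kv hm'

-- lift "no key at position 0" through the pipeline
theorem pvLift (k : List Char) (c : Char) (t : List Char) (L : List (List Char × List Char))
    (hk : k ≠ []) (hL : ∀ kv ∈ L, kv.2 ≠ [] ∧ kv.2.headI ∉ k.tail)
    (hno : ¬ k <+: (c :: t)) : ¬ k <+: (c :: List.foldl pvFrep t L) := by
  cases k with
  | nil => exact absurd rfl hk
  | cons a ktl =>
    intro hpre
    obtain ⟨hb, htl⟩ := List.cons_prefix_cons.mp hpre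
    exact hno (List.cons_prefix_cons.mpr ⟨hb, pvChain L hL t htl⟩)

-- the two unfolding equations of the scan
theorem pvScan_eq_some {c : Char} {t : List Char} {kv : List Char × List Char}
    (h : pvFind (c :: t) pvPairs = some kv) :
    pvScan (c :: t) = kv.2 ++ pvScan ((c :: t).drop kv.1.length) := by
  rw [pvScan]
  split <;> simp_all

theorem pvScan_eq_none {c : Char} {t : List Char}
    (h : pvFind (c :: t) pvPairs = none) :
    pvScan (c :: t) = c :: pvScan t := by
  rw [pvScan]
  split <;> simp_all

theorem pvL1 (r : List Char) :
    pvFl ("Hola".toList ++ r) = "Hello".toList ++ pvFl r := by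
  simp only [pvFl, pvPairs, List.foldl_cons, List.foldl_nil, pvFrep]
  rw [pvRep_match_append "Hola".toList "Hello".toList _ (by decide)]
  rw [pvPushStatic "Estimado/a".toList "Dear".toList "Hello".toList _ (by decide)]
  rw [pvPushStatic "Saludos cordiales".toList "Best regards".toList "Hello".toList _ (by decide)]
  rw [pvPushStatic "Gracias".toList "Thank you".toList "Hello".toList _ (by decide)]
  rw [pvPushStatic "Por favor".toList "Please".toList "Hello".toList _ (by decide)]
  rw [pvPushStatic "Disculpe".toList "Sorry".toList "Hello".toList _ (by decide)]
  rw [pvPushStatic "Perdón".toList "Excuse me".toList "Hello".toList _ (by decide)]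
  rw [pvPushStatic "muy importante".toList "very important".toList "Hello".toList _ (by decide)]
  rw [pvPushStatic "importante".toList "important".toList "Hello".toList _ (by decide)]
  rw [pvPushStatic "recomendado".toList "recommended".toList "Hello".toList _ (by decide)]

theorem pvL2 (r : List Char) (hr : ¬ "ecomendado".toList <+: r) :
    pvFl ("Estimado/a".toList ++ r) = "Dear".toList ++ pvFl r := by
  simp only [pvFl, pvPairs, List.foldl_cons, List.foldl_nil, pvFrep]
  have hD : ¬ "ecomendado".toList <+: (List.foldl pvFrep r [("Hola".toList, "Hello".toList), ("Estimado/a".toList, "Dear".toList), ("Saludos cordiales".toList, "Best regards".toList), ("Gracias".toList, "Thank you".toList), ("Por favor".toList, "Please".toList), ("Disculpe".toList, "Sorry".toList), ("Perdón".toList, "Excuse me".toList), ("muy importante".toList, "very important".toList), ("importante".toList, "important".toList)]) :=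
    fun hp => hr (pvChain _ (by decide) r hp)
  simp only [List.foldl_cons, List.foldl_nil, pvFrep] at hD
  rw [pvPushStatic "Hola".toList "Hello".toList "Estimado/a".toList _ (by decide)]
  rw [pvRep_match_append "Estimado/a".toList "Dear".toList _ (by decide)]
  rw [pvPushStatic "Saludos cordiales".toList "Best regards".toList "Dear".toList _ (by decide)]
  rw [pvPushStatic "Gracias".toList "Thank you".toList "Dear".toList _ (by decide)]
  rw [pvPushStatic "Por favor".toList "Please".toList "Dear".toList _ (by decide)]
  rw [pvPushStatic "Disculpe".toList "Sorry".toList "Dear".toList _ (by decide)]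
  rw [pvPushStatic "Perdón".toList "Excuse me".toList "Dear".toList _ (by decide)]
  rw [pvPushStatic "muy importante".toList "very important".toList "Dear".toList _ (by decide)]
  rw [pvPushStatic "importante".toList "important".toList "Dear".toList _ (by decide)]
  rw [pvPush_Dear _ hD]

theorem pvL3 (r : List Char) :
    pvFl ("Saludos cordiales".toList ++ r) = "Best regards".toList ++ pvFl r := by
  simp only [pvFl, pvPairs, List.foldl_cons, List.foldl_nil, pvFrep]
  rw [pvPushStatic "Hola".toList "Hello".toList "Saludos cordiales".toList _ (by decide)]
  rw [pvPushStatic "Estimado/a".toList "Dear".toList "Saludos cordiales".toList _ (by decide)]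
  rw [pvRep_match_append "Saludos cordiales".toList "Best regards".toList _ (by decide)]
  rw [pvPushStatic "Gracias".toList "Thank you".toList "Best regards".toList _ (by decide)]
  rw [pvPushStatic "Por favor".toList "Please".toList "Best regards".toList _ (by decide)]
  rw [pvPushStatic "Disculpe".toList "Sorry".toList "Best regards".toList _ (by decide)]
  rw [pvPushStatic "Perdón".toList "Excuse me".toList "Best regards".toList _ (by decide)]
  rw [pvPushStatic "muy importante".toList "very important".toList "Best regards".toList _ (by decide)]
  rw [pvPushStatic "importante".toList "important".toList "Best regards".toList _ (by decide)]
  rw [pvPushStatic "recomendado".toList "recommended".toList "Best regards".toList _ (by decide)]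

theorem pvL4 (r : List Char) :
    pvFl ("Gracias".toList ++ r) = "Thank you".toList ++ pvFl r := by
  simp only [pvFl, pvPairs, List.foldl_cons, List.foldl_nil, pvFrep]
  rw [pvPushStatic "Hola".toList "Hello".toList "Gracias".toList _ (by decide)]
  rw [pvPushStatic "Estimado/a".toList "Dear".toList "Gracias".toList _ (by decide)]
  rw [pvPushStatic "Saludos cordiales".toList "Best regards".toList "Gracias".toList _ (by decide)]
  rw [pvRep_match_append "Gracias".toList "Thank you".toList _ (by decide)]
  rw [pvPushStatic "Por favor".toList "Please".toList "Thank you".toList _ (by decide)]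
  rw [pvPushStatic "Disculpe".toList "Sorry".toList "Thank you".toList _ (by decide)]
  rw [pvPushStatic "Perdón".toList "Excuse me".toList "Thank you".toList _ (by decide)]
  rw [pvPushStatic "muy importante".toList "very important".toList "Thank you".toList _ (by decide)]
  rw [pvPushStatic "importante".toList "important".toList "Thank you".toList _ (by decide)]
  rw [pvPushStatic "recomendado".toList "recommended".toList "Thank you".toList _ (by decide)]

theorem pvL5 (r : List Char) :
    pvFl ("Por favor".toList ++ r) = "Please".toList ++ pvFl r := by
  simp only [pvFl, pvPairs, List.foldl_cons, List.foldl_nil, pvFrep]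
  rw [pvPushStatic "Hola".toList "Hello".toList "Por favor".toList _ (by decide)]
  rw [pvPushStatic "Estimado/a".toList "Dear".toList "Por favor".toList _ (by decide)]
  rw [pvPushStatic "Saludos cordiales".toList "Best regards".toList "Por favor".toList _ (by decide)]
  rw [pvPushStatic "Gracias".toList "Thank you".toList "Por favor".toList _ (by decide)]
  rw [pvRep_match_append "Por favor".toList "Please".toList _ (by decide)]
  rw [pvPushStatic "Disculpe".toList "Sorry".toList "Please".toList _ (by decide)]
  rw [pvPushStatic "Perdón".toList "Excuse me".toList "Please".toList _ (by decide)]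
  rw [pvPushStatic "muy importante".toList "very important".toList "Please".toList _ (by decide)]
  rw [pvPushStatic "importante".toList "important".toList "Please".toList _ (by decide)]
  rw [pvPushStatic "recomendado".toList "recommended".toList "Please".toList _ (by decide)]

theorem pvL6 (r : List Char) :
    pvFl ("Disculpe".toList ++ r) = "Sorry".toList ++ pvFl r := by
  simp only [pvFl, pvPairs, List.foldl_cons, List.foldl_nil, pvFrep]
  rw [pvPushStatic "Hola".toList "Hello".toList "Disculpe".toList _ (by decide)]
  rw [pvPushStatic "Estimado/a".toList "Dear".toList "Disculpe".toList _ (by decide)]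
  rw [pvPushStatic "Saludos cordiales".toList "Best regards".toList "Disculpe".toList _ (by decide)]
  rw [pvPushStatic "Gracias".toList "Thank you".toList "Disculpe".toList _ (by decide)]
  rw [pvPushStatic "Por favor".toList "Please".toList "Disculpe".toList _ (by decide)]
  rw [pvRep_match_append "Disculpe".toList "Sorry".toList _ (by decide)]
  rw [pvPushStatic "Perdón".toList "Excuse me".toList "Sorry".toList _ (by decide)]
  rw [pvPushStatic "muy importante".toList "very important".toList "Sorry".toList _ (by decide)]
  rw [pvPushStatic "importante".toList "important".toList "Sorry".toList _ (by decide)]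
  rw [pvPushStatic "recomendado".toList "recommended".toList "Sorry".toList _ (by decide)]

theorem pvL7 (r : List Char) :
    pvFl ("Perdón".toList ++ r) = "Excuse me".toList ++ pvFl r := by
  simp only [pvFl, pvPairs, List.foldl_cons, List.foldl_nil, pvFrep]
  rw [pvPushStatic "Hola".toList "Hello".toList "Perdón".toList _ (by decide)]
  rw [pvPushStatic "Estimado/a".toList "Dear".toList "Perdón".toList _ (by decide)]
  rw [pvPushStatic "Saludos cordiales".toList "Best regards".toList "Perdón".toList _ (by decide)]
  rw [pvPushStatic "Gracias".toList "Thank you".toList "Perdón".toList _ (by decide)]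
  rw [pvPushStatic "Por favor".toList "Please".toList "Perdón".toList _ (by decide)]
  rw [pvPushStatic "Disculpe".toList "Sorry".toList "Perdón".toList _ (by decide)]
  rw [pvRep_match_append "Perdón".toList "Excuse me".toList _ (by decide)]
  rw [pvPushStatic "muy importante".toList "very important".toList "Excuse me".toList _ (by decide)]
  rw [pvPushStatic "importante".toList "important".toList "Excuse me".toList _ (by decide)]
  rw [pvPushStatic "recomendado".toList "recommended".toList "Excuse me".toList _ (by decide)]

theorem pvL8 (r : List Char) (hr : ¬ ['e'] <+: r) :
    pvFl ("muy importante".toList ++ r) = "very important".toList ++ pvFl r := by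
  simp only [pvFl, pvPairs, List.foldl_cons, List.foldl_nil, pvFrep]
  have hE : ¬ ['e'] <+: (List.foldl pvFrep r [("Hola".toList, "Hello".toList), ("Estimado/a".toList, "Dear".toList), ("Saludos cordiales".toList, "Best regards".toList), ("Gracias".toList, "Thank you".toList), ("Por favor".toList, "Please".toList), ("Disculpe".toList, "Sorry".toList), ("Perdón".toList, "Excuse me".toList), ("muy importante".toList, "very important".toList)]) :=
    fun hp => hr (pvChain _ (by decide) r hp)
  simp only [List.foldl_cons, List.foldl_nil, pvFrep] at hE
  rw [pvPushStatic "Hola".toList "Hello".toList "muy importante".toList _ (by decide)]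
  rw [pvPushStatic "Estimado/a".toList "Dear".toList "muy importante".toList _ (by decide)]
  rw [pvPushStatic "Saludos cordiales".toList "Best regards".toList "muy importante".toList _ (by decide)]
  rw [pvPushStatic "Gracias".toList "Thank you".toList "muy importante".toList _ (by decide)]
  rw [pvPushStatic "Por favor".toList "Please".toList "muy importante".toList _ (by decide)]
  rw [pvPushStatic "Disculpe".toList "Sorry".toList "muy importante".toList _ (by decide)]
  rw [pvPushStatic "Perdón".toList "Excuse me".toList "muy importante".toList _ (by decide)]
  rw [pvRep_match_append "muy importante".toList "very important".toList _ (by decide)]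
  rw [pvPush_e _ hE]
  rw [pvPushStatic "recomendado".toList "recommended".toList "very important".toList _ (by decide)]

theorem pvL9 (r : List Char) :
    pvFl ("importante".toList ++ r) = "important".toList ++ pvFl r := by
  simp only [pvFl, pvPairs, List.foldl_cons, List.foldl_nil, pvFrep]
  rw [pvPushStatic "Hola".toList "Hello".toList "importante".toList _ (by decide)]
  rw [pvPushStatic "Estimado/a".toList "Dear".toList "importante".toList _ (by decide)]
  rw [pvPushStatic "Saludos cordiales".toList "Best regards".toList "importante".toList _ (by decide)]
  rw [pvPushStatic "Gracias".toList "Thank you".toList "importante".toList _ (by decide)]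
  rw [pvPushStatic "Por favor".toList "Please".toList "importante".toList _ (by decide)]
  rw [pvPushStatic "Disculpe".toList "Sorry".toList "importante".toList _ (by decide)]
  rw [pvPushStatic "Perdón".toList "Excuse me".toList "importante".toList _ (by decide)]
  rw [pvPushStatic "muy importante".toList "very important".toList "importante".toList _ (by decide)]
  rw [pvRep_match_append "importante".toList "important".toList _ (by decide)]
  rw [pvPushStatic "recomendado".toList "recommended".toList "important".toList _ (by decide)]

theorem pvL10 (r : List Char) :
    pvFl ("recomendado".toList ++ r) = "recommended".toList ++ pvFl r := by
  simp only [pvFl, pvPairs, List.foldl_cons, List.foldl_nil, pvFrep]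
  rw [pvPushStatic "Hola".toList "Hello".toList "recomendado".toList _ (by decide)]
  rw [pvPushStatic "Estimado/a".toList "Dear".toList "recomendado".toList _ (by decide)]
  rw [pvPushStatic "Saludos cordiales".toList "Best regards".toList "recomendado".toList _ (by decide)]
  rw [pvPushStatic "Gracias".toList "Thank you".toList "recomendado".toList _ (by decide)]
  rw [pvPushStatic "Por favor".toList "Please".toList "recomendado".toList _ (by decide)]
  rw [pvPushStatic "Disculpe".toList "Sorry".toList "recomendado".toList _ (by decide)]
  rw [pvPushStatic "Perdón".toList "Excuse me".toList "recomendado".toList _ (by decide)]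
  rw [pvPushStatic "muy importante".toList "very important".toList "recomendado".toList _ (by decide)]
  rw [pvPushStatic "importante".toList "important".toList "recomendado".toList _ (by decide)]
  rw [pvRep_match_append "recomendado".toList "recommended".toList _ (by decide)]

theorem pvLskip (c : Char) (t : List Char)
    (hno : ∀ kv ∈ pvPairs, ¬ kv.1 <+: (c :: t)) :
    pvFl (c :: t) = c :: pvFl t := by
  simp only [pvFl, pvPairs, List.foldl_cons, List.foldl_nil, pvFrep]
  rw [pvRep_skip _ (hno ("Hola".toList, "Hello".toList) (by decide))]
  have h2 : ¬ "Estimado/a".toList <+: (c :: List.foldl pvFrep t [("Hola".toList, "Hello".toList)]) :=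
    pvLift "Estimado/a".toList c t _ (by decide) (by decide) (hno ("Estimado/a".toList, "Dear".toList) (by decide))
  simp only [List.foldl_cons, List.foldl_nil, pvFrep] at h2
  rw [pvRep_skip _ h2]
  have h3 : ¬ "Saludos cordiales".toList <+: (c :: List.foldl pvFrep t [("Hola".toList, "Hello".toList), ("Estimado/a".toList, "Dear".toList)]) :=
    pvLift "Saludos cordiales".toList c t _ (by decide) (by decide) (hno ("Saludos cordiales".toList, "Best regards".toList) (by decide))
  simp only [List.foldl_cons, List.foldl_nil, pvFrep] at h3
  rw [pvRep_skip _ h3]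
  have h4 : ¬ "Gracias".toList <+: (c :: List.foldl pvFrep t [("Hola".toList, "Hello".toList), ("Estimado/a".toList, "Dear".toList), ("Saludos cordiales".toList, "Best regards".toList)]) :=
    pvLift "Gracias".toList c t _ (by decide) (by decide) (hno ("Gracias".toList, "Thank you".toList) (by decide))
  simp only [List.foldl_cons, List.foldl_nil, pvFrep] at h4
  rw [pvRep_skip _ h4]
  have h5 : ¬ "Por favor".toList <+: (c :: List.foldl pvFrep t [("Hola".toList, "Hello".toList), ("Estimado/a".toList, "Dear".toList), ("Saludos cordiales".toList, "Best regards".toList), ("Gracias".toList, "Thank you".toList)]) :=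
    pvLift "Por favor".toList c t _ (by decide) (by decide) (hno ("Por favor".toList, "Please".toList) (by decide))
  simp only [List.foldl_cons, List.foldl_nil, pvFrep] at h5
  rw [pvRep_skip _ h5]
  have h6 : ¬ "Disculpe".toList <+: (c :: List.foldl pvFrep t [("Hola".toList, "Hello".toList), ("Estimado/a".toList, "Dear".toList), ("Saludos cordiales".toList, "Best regards".toList), ("Gracias".toList, "Thank you".toList), ("Por favor".toList, "Please".toList)]) :=
    pvLift "Disculpe".toList c t _ (by decide) (by decide) (hno ("Disculpe".toList, "Sorry".toList) (by decide))
  simp only [List.foldl_cons, List.foldl_nil, pvFrep] at h6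
  rw [pvRep_skip _ h6]
  have h7 : ¬ "Perdón".toList <+: (c :: List.foldl pvFrep t [("Hola".toList, "Hello".toList), ("Estimado/a".toList, "Dear".toList), ("Saludos cordiales".toList, "Best regards".toList), ("Gracias".toList, "Thank you".toList), ("Por favor".toList, "Please".toList), ("Disculpe".toList, "Sorry".toList)]) :=
    pvLift "Perdón".toList c t _ (by decide) (by decide) (hno ("Perdón".toList, "Excuse me".toList) (by decide))
  simp only [List.foldl_cons, List.foldl_nil, pvFrep] at h7
  rw [pvRep_skip _ h7]
  have h8 : ¬ "muy importante".toList <+: (c :: List.foldl pvFrep t [("Hola".toList, "Hello".toList), ("Estimado/a".toList, "Dear".toList), ("Saludos cordiales".toList, "Best regards".toList), ("Gracias".toList, "Thank you".toList), ("Por favor".toList, "Please".toList), ("Disculpe".toList, "Sorry".toList), ("Perdón".toList, "Excuse me".toList)]) :=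
    pvLift "muy importante".toList c t _ (by decide) (by decide) (hno ("muy importante".toList, "very important".toList) (by decide))
  simp only [List.foldl_cons, List.foldl_nil, pvFrep] at h8
  rw [pvRep_skip _ h8]
  have h9 : ¬ "importante".toList <+: (c :: List.foldl pvFrep t [("Hola".toList, "Hello".toList), ("Estimado/a".toList, "Dear".toList), ("Saludos cordiales".toList, "Best regards".toList), ("Gracias".toList, "Thank you".toList), ("Por favor".toList, "Please".toList), ("Disculpe".toList, "Sorry".toList), ("Perdón".toList, "Excuse me".toList), ("muy importante".toList, "very important".toList)]) :=
    pvLift "importante".toList c t _ (by decide) (by decide) (hno ("importante".toList, "important".toList) (by decide))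
  simp only [List.foldl_cons, List.foldl_nil, pvFrep] at h9
  rw [pvRep_skip _ h9]
  have h10 : ¬ "recomendado".toList <+: (c :: List.foldl pvFrep t [("Hola".toList, "Hello".toList), ("Estimado/a".toList, "Dear".toList), ("Saludos cordiales".toList, "Best regards".toList), ("Gracias".toList, "Thank you".toList), ("Por favor".toList, "Please".toList), ("Disculpe".toList, "Sorry".toList), ("Perdón".toList, "Excuse me".toList), ("muy importante".toList, "very important".toList), ("importante".toList, "important".toList)]) :=
    pvLift "recomendado".toList c t _ (by decide) (by decide) (hno ("recomendado".toList, "recommended".toList) (by decide))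
  simp only [List.foldl_cons, List.foldl_nil, pvFrep] at h10
  rw [pvRep_skip _ h10]

theorem pvMain : ∀ t, pvGood t → pvFl t = pvScan t := by
  intro t
  induction t using pvScan.induct with
  | case1 =>
    intro _
    rw [show pvScan [] = [] from by rw [pvScan]]
    simp [pvFl, pvPairs, List.foldl_cons, List.foldl_nil, pvFrep, pvRep_nil]
  | case2 c t kv hfind ih =>
    intro hg
    simp only [pvFind, pvPairs] at hfind
    by_cases h1 : "Hola".toList <+: (c :: t)
    · obtain rfl : kv = ("Hola".toList, "Hello".toList) := by
        rw [if_pos (by simpa [List.isPrefixOf_iff_prefix] using h1)] at hfind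
        injection hfind with hkv
        exact hkv.symm
      obtain ⟨r, hr⟩ := h1
      rw [pvScan_eq_some hfind]
      have hdr : (c :: t).drop ("Hola".toList).length = r := by rw [← hr, List.drop_left]
      rw [hdr] at ih
      have hgr := pvGood_sublist ((show r <:+ (c :: t) from ⟨"Hola".toList, hr⟩).isInfix) hg
      rw [← hr, List.drop_left, pvL1 r, ih hgr]
    by_cases h2 : "Estimado/a".toList <+: (c :: t)
    · obtain rfl : kv = ("Estimado/a".toList, "Dear".toList) := by
        rw [if_neg (by simpa [List.isPrefixOf_iff_prefix] using h1)] at hfind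
        rw [if_pos (by simpa [List.isPrefixOf_iff_prefix] using h2)] at hfind
        injection hfind with hkv
        exact hkv.symm
      obtain ⟨r, hr⟩ := h2
      rw [pvScan_eq_some hfind]
      have hdr : (c :: t).drop ("Estimado/a".toList).length = r := by rw [← hr, List.drop_left]
      rw [hdr] at ih
      have hgr := pvGood_sublist ((show r <:+ (c :: t) from ⟨"Estimado/a".toList, hr⟩).isInfix) hg
      have hrr : ¬ "ecomendado".toList <+: r := by
        intro hp
        refine hg.2 (List.IsPrefix.isInfix ?_)
        rw [show "Estimado/aecomendado".toList = "Estimado/a".toList ++ "ecomendado".toList from by decide, ← hr]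
        exact (List.prefix_append_right_inj _).mpr hp
      rw [← hr, List.drop_left, pvL2 r hrr, ih hgr]
    by_cases h3 : "Saludos cordiales".toList <+: (c :: t)
    · obtain rfl : kv = ("Saludos cordiales".toList, "Best regards".toList) := by
        rw [if_neg (by simpa [List.isPrefixOf_iff_prefix] using h1)] at hfind
        rw [if_neg (by simpa [List.isPrefixOf_iff_prefix] using h2)] at hfind
        rw [if_pos (by simpa [List.isPrefixOf_iff_prefix] using h3)] at hfind
        injection hfind with hkv
        exact hkv.symm
      obtain ⟨r, hr⟩ := h3
      rw [pvScan_eq_some hfind]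
      have hdr : (c :: t).drop ("Saludos cordiales".toList).length = r := by rw [← hr, List.drop_left]
      rw [hdr] at ih
      have hgr := pvGood_sublist ((show r <:+ (c :: t) from ⟨"Saludos cordiales".toList, hr⟩).isInfix) hg
      rw [← hr, List.drop_left, pvL3 r, ih hgr]
    by_cases h4 : "Gracias".toList <+: (c :: t)
    · obtain rfl : kv = ("Gracias".toList, "Thank you".toList) := by
        rw [if_neg (by simpa [List.isPrefixOf_iff_prefix] using h1)] at hfind
        rw [if_neg (by simpa [List.isPrefixOf_iff_prefix] using h2)] at hfind
        rw [if_neg (by simpa [List.isPrefixOf_iff_prefix] using h3)] at hfind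
        rw [if_pos (by simpa [List.isPrefixOf_iff_prefix] using h4)] at hfind
        injection hfind with hkv
        exact hkv.symm
      obtain ⟨r, hr⟩ := h4
      rw [pvScan_eq_some hfind]
      have hdr : (c :: t).drop ("Gracias".toList).length = r := by rw [← hr, List.drop_left]
      rw [hdr] at ih
      have hgr := pvGood_sublist ((show r <:+ (c :: t) from ⟨"Gracias".toList, hr⟩).isInfix) hg
      rw [← hr, List.drop_left, pvL4 r, ih hgr]
    by_cases h5 : "Por favor".toList <+: (c :: t)
    · obtain rfl : kv = ("Por favor".toList, "Please".toList) := by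
        rw [if_neg (by simpa [List.isPrefixOf_iff_prefix] using h1)] at hfind
        rw [if_neg (by simpa [List.isPrefixOf_iff_prefix] using h2)] at hfind
        rw [if_neg (by simpa [List.isPrefixOf_iff_prefix] using h3)] at hfind
        rw [if_neg (by simpa [List.isPrefixOf_iff_prefix] using h4)] at hfind
        rw [if_pos (by simpa [List.isPrefixOf_iff_prefix] using h5)] at hfind
        injection hfind with hkv
        exact hkv.symm
      obtain ⟨r, hr⟩ := h5
      rw [pvScan_eq_some hfind]
      have hdr : (c :: t).drop ("Por favor".toList).length = r := by rw [← hr, List.drop_left]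
      rw [hdr] at ih
      have hgr := pvGood_sublist ((show r <:+ (c :: t) from ⟨"Por favor".toList, hr⟩).isInfix) hg
      rw [← hr, List.drop_left, pvL5 r, ih hgr]
    by_cases h6 : "Disculpe".toList <+: (c :: t)
    · obtain rfl : kv = ("Disculpe".toList, "Sorry".toList) := by
        rw [if_neg (by simpa [List.isPrefixOf_iff_prefix] using h1)] at hfind
        rw [if_neg (by simpa [List.isPrefixOf_iff_prefix] using h2)] at hfind
        rw [if_neg (by simpa [List.isPrefixOf_iff_prefix] using h3)] at hfind
        rw [if_neg (by simpa [List.isPrefixOf_iff_prefix] using h4)] at hfind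
        rw [if_neg (by simpa [List.isPrefixOf_iff_prefix] using h5)] at hfind
        rw [if_pos (by simpa [List.isPrefixOf_iff_prefix] using h6)] at hfind
        injection hfind with hkv
        exact hkv.symm
      obtain ⟨r, hr⟩ := h6
      rw [pvScan_eq_some hfind]
      have hdr : (c :: t).drop ("Disculpe".toList).length = r := by rw [← hr, List.drop_left]
      rw [hdr] at ih
      have hgr := pvGood_sublist ((show r <:+ (c :: t) from ⟨"Disculpe".toList, hr⟩).isInfix) hg
      rw [← hr, List.drop_left, pvL6 r, ih hgr]
    by_cases h7 : "Perdón".toList <+: (c :: t)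
    · obtain rfl : kv = ("Perdón".toList, "Excuse me".toList) := by
        rw [if_neg (by simpa [List.isPrefixOf_iff_prefix] using h1)] at hfind
        rw [if_neg (by simpa [List.isPrefixOf_iff_prefix] using h2)] at hfind
        rw [if_neg (by simpa [List.isPrefixOf_iff_prefix] using h3)] at hfind
        rw [if_neg (by simpa [List.isPrefixOf_iff_prefix] using h4)] at hfind
        rw [if_neg (by simpa [List.isPrefixOf_iff_prefix] using h5)] at hfind
        rw [if_neg (by simpa [List.isPrefixOf_iff_prefix] using h6)] at hfind
        rw [if_pos (by simpa [List.isPrefixOf_iff_prefix] using h7)] at hfind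
        injection hfind with hkv
        exact hkv.symm
      obtain ⟨r, hr⟩ := h7
      rw [pvScan_eq_some hfind]
      have hdr : (c :: t).drop ("Perdón".toList).length = r := by rw [← hr, List.drop_left]
      rw [hdr] at ih
      have hgr := pvGood_sublist ((show r <:+ (c :: t) from ⟨"Perdón".toList, hr⟩).isInfix) hg
      rw [← hr, List.drop_left, pvL7 r, ih hgr]
    by_cases h8 : "muy importante".toList <+: (c :: t)
    · obtain rfl : kv = ("muy importante".toList, "very important".toList) := by
        rw [if_neg (by simpa [List.isPrefixOf_iff_prefix] using h1)] at hfind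
        rw [if_neg (by simpa [List.isPrefixOf_iff_prefix] using h2)] at hfind
        rw [if_neg (by simpa [List.isPrefixOf_iff_prefix] using h3)] at hfind
        rw [if_neg (by simpa [List.isPrefixOf_iff_prefix] using h4)] at hfind
        rw [if_neg (by simpa [List.isPrefixOf_iff_prefix] using h5)] at hfind
        rw [if_neg (by simpa [List.isPrefixOf_iff_prefix] using h6)] at hfind
        rw [if_neg (by simpa [List.isPrefixOf_iff_prefix] using h7)] at hfind
        rw [if_pos (by simpa [List.isPrefixOf_iff_prefix] using h8)] at hfind
        injection hfind with hkv
        exact hkv.symm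
      obtain ⟨r, hr⟩ := h8
      rw [pvScan_eq_some hfind]
      have hdr : (c :: t).drop ("muy importante".toList).length = r := by rw [← hr, List.drop_left]
      rw [hdr] at ih
      have hgr := pvGood_sublist ((show r <:+ (c :: t) from ⟨"muy importante".toList, hr⟩).isInfix) hg
      have hrr : ¬ ['e'] <+: r := by
        intro hp
        refine hg.1 (List.IsPrefix.isInfix ?_)
        rw [show "muy importantee".toList = "muy importante".toList ++ ['e'] from by decide, ← hr]
        exact (List.prefix_append_right_inj _).mpr hp
      rw [← hr, List.drop_left, pvL8 r hrr, ih hgr]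
    by_cases h9 : "importante".toList <+: (c :: t)
    · obtain rfl : kv = ("importante".toList, "important".toList) := by
        rw [if_neg (by simpa [List.isPrefixOf_iff_prefix] using h1)] at hfind
        rw [if_neg (by simpa [List.isPrefixOf_iff_prefix] using h2)] at hfind
        rw [if_neg (by simpa [List.isPrefixOf_iff_prefix] using h3)] at hfind
        rw [if_neg (by simpa [List.isPrefixOf_iff_prefix] using h4)] at hfind
        rw [if_neg (by simpa [List.isPrefixOf_iff_prefix] using h5)] at hfind
        rw [if_neg (by simpa [List.isPrefixOf_iff_prefix] using h6)] at hfind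
        rw [if_neg (by simpa [List.isPrefixOf_iff_prefix] using h7)] at hfind
        rw [if_neg (by simpa [List.isPrefixOf_iff_prefix] using h8)] at hfind
        rw [if_pos (by simpa [List.isPrefixOf_iff_prefix] using h9)] at hfind
        injection hfind with hkv
        exact hkv.symm
      obtain ⟨r, hr⟩ := h9
      rw [pvScan_eq_some hfind]
      have hdr : (c :: t).drop ("importante".toList).length = r := by rw [← hr, List.drop_left]
      rw [hdr] at ih
      have hgr := pvGood_sublist ((show r <:+ (c :: t) from ⟨"importante".toList, hr⟩).isInfix) hg
      rw [← hr, List.drop_left, pvL9 r, ih hgr]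
    by_cases h10 : "recomendado".toList <+: (c :: t)
    · obtain rfl : kv = ("recomendado".toList, "recommended".toList) := by
        rw [if_neg (by simpa [List.isPrefixOf_iff_prefix] using h1)] at hfind
        rw [if_neg (by simpa [List.isPrefixOf_iff_prefix] using h2)] at hfind
        rw [if_neg (by simpa [List.isPrefixOf_iff_prefix] using h3)] at hfind
        rw [if_neg (by simpa [List.isPrefixOf_iff_prefix] using h4)] at hfind
        rw [if_neg (by simpa [List.isPrefixOf_iff_prefix] using h5)] at hfind
        rw [if_neg (by simpa [List.isPrefixOf_iff_prefix] using h6)] at hfind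
        rw [if_neg (by simpa [List.isPrefixOf_iff_prefix] using h7)] at hfind
        rw [if_neg (by simpa [List.isPrefixOf_iff_prefix] using h8)] at hfind
        rw [if_neg (by simpa [List.isPrefixOf_iff_prefix] using h9)] at hfind
        rw [if_pos (by simpa [List.isPrefixOf_iff_prefix] using h10)] at hfind
        injection hfind with hkv
        exact hkv.symm
      obtain ⟨r, hr⟩ := h10
      rw [pvScan_eq_some hfind]
      have hdr : (c :: t).drop ("recomendado".toList).length = r := by rw [← hr, List.drop_left]
      rw [hdr] at ih
      have hgr := pvGood_sublist ((show r <:+ (c :: t) from ⟨"recomendado".toList, hr⟩).isInfix) hg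
      rw [← hr, List.drop_left, pvL10 r, ih hgr]
    rw [if_neg (by simpa [List.isPrefixOf_iff_prefix] using h1)] at hfind
    rw [if_neg (by simpa [List.isPrefixOf_iff_prefix] using h2)] at hfind
    rw [if_neg (by simpa [List.isPrefixOf_iff_prefix] using h3)] at hfind
    rw [if_neg (by simpa [List.isPrefixOf_iff_prefix] using h4)] at hfind
    rw [if_neg (by simpa [List.isPrefixOf_iff_prefix] using h5)] at hfind
    rw [if_neg (by simpa [List.isPrefixOf_iff_prefix] using h6)] at hfind
    rw [if_neg (by simpa [List.isPrefixOf_iff_prefix] using h7)] at hfind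
    rw [if_neg (by simpa [List.isPrefixOf_iff_prefix] using h8)] at hfind
    rw [if_neg (by simpa [List.isPrefixOf_iff_prefix] using h9)] at hfind
    rw [if_neg (by simpa [List.isPrefixOf_iff_prefix] using h10)] at hfind
    cases hfind
  | case3 c t hfind ih =>
    intro hg
    rw [pvScan_eq_none hfind, pvLskip c t (pvFind_none hfind),
      ih (pvGood_sublist ((show t <:+ (c :: t) from ⟨[c], rfl⟩).isInfix) hg)]

-- ===== tightness: A and B really differ on every input of D_ =====

theorem pvFl_nil : pvFl [] = [] := by
  simp [pvFl, pvPairs, List.foldl_cons, List.foldl_nil, pvFrep, pvRep_nil]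

theorem pvNotPrefix_headI (k : List Char) (c : Char) (w : List Char)
    (h1 : k.headI ≠ c) (h2 : k ≠ []) : ¬ k <+: (c :: w) := by
  cases k with
  | nil => exact absurd rfl h2
  | cons a ktl =>
    intro hp
    exact h1 (by simpa using (List.cons_prefix_cons.mp hp).1)

theorem pvNotPre2 {k : List Char} {a b : Char} {ktl : List Char} (hk : k = a :: b :: ktl)
    {c2 : Char} (hne : b ≠ c2) (c1 : Char) (X : List Char) : ¬ k <+: (c1 :: c2 :: X) := by
  subst hk
  intro hp
  exact hne (List.cons_prefix_cons.mp (List.cons_prefix_cons.mp hp).2).1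

theorem pvFind_noneL (s : List Char) (L : List (List Char × List Char))
    (h : ∀ kv ∈ L, ¬ kv.1 <+: s) : pvFind s L = none := by
  induction L with
  | nil => rfl
  | cons kv rest ih =>
    rw [show pvFind s (kv :: rest) = if kv.1.isPrefixOf s then some kv else pvFind s rest from rfl,
      if_neg (by simpa [List.isPrefixOf_iff_prefix] using h kv List.mem_cons_self)]
    exact ih (fun kv' hm => h kv' (List.mem_cons_of_mem _ hm))

theorem pvInfix_cases (P u r : List Char) (h : P <:+: u ++ r) :
    (∃ i, i < u.length ∧ P <+: (u.drop i ++ r)) ∨ P <:+: r := by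
  obtain ⟨x, y, hxy⟩ := h
  by_cases hi : x.length < u.length
  · left
    refine ⟨x.length, hi, ?_⟩
    have hd : (u ++ r).drop x.length = P ++ y := by
      rw [← hxy, List.append_assoc, List.drop_left]
    rw [List.drop_append_of_le_length (le_of_lt hi)] at hd
    exact ⟨y, hd.symm⟩
  · right
    have hux : u <+: x := by
      have h1 : u <+: x ++ (P ++ y) := by
        rw [← List.append_assoc, hxy]; exact List.prefix_append u r
      rcases List.prefix_or_prefix_of_prefix h1 (List.prefix_append x _) with h2 | h2
      · exact h2
      · have hxu : x = u := h2.eq_of_length_le (by omega)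
        exact hxu ▸ List.prefix_rfl
    obtain ⟨x', rfl⟩ := hux
    refine ⟨x', y, ?_⟩
    have h3 := hxy
    rw [List.append_assoc, List.append_assoc] at h3
    have h4 := List.append_cancel_left h3
    rw [← List.append_assoc] at h4
    exact h4


theorem pvLocP1_1 (r : List Char) (h : "muy importantee".toList <:+: ("Hola".toList ++ r)) :
    "muy importantee".toList <:+: r := by
  rcases pvInfix_cases _ _ _ h with ⟨i, hi, hp⟩ | hinf
  · rw [show ("Hola".toList).length = 4 from by decide] at hi
    interval_cases i <;>
      rcases pvPrefix_append_split hp with h' | ⟨h', h''⟩ <;>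
      first
      | exact absurd h' (by decide)
  · exact hinf


theorem pvLocP1_2 (r : List Char) (h : "muy importantee".toList <:+: ("Estimado/a".toList ++ r)) :
    "muy importantee".toList <:+: r := by
  rcases pvInfix_cases _ _ _ h with ⟨i, hi, hp⟩ | hinf
  · rw [show ("Estimado/a".toList).length = 10 from by decide] at hi
    interval_cases i <;>
      rcases pvPrefix_append_split hp with h' | ⟨h', h''⟩ <;>
      first
      | exact absurd h' (by decide)
  · exact hinf


theorem pvLocP1_3 (r : List Char) (h : "muy importantee".toList <:+: ("Saludos cordiales".toList ++ r)) :
    "muy importantee".toList <:+: r := by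
  rcases pvInfix_cases _ _ _ h with ⟨i, hi, hp⟩ | hinf
  · rw [show ("Saludos cordiales".toList).length = 17 from by decide] at hi
    interval_cases i <;>
      rcases pvPrefix_append_split hp with h' | ⟨h', h''⟩ <;>
      first
      | exact absurd h' (by decide)
  · exact hinf


theorem pvLocP1_4 (r : List Char) (h : "muy importantee".toList <:+: ("Gracias".toList ++ r)) :
    "muy importantee".toList <:+: r := by
  rcases pvInfix_cases _ _ _ h with ⟨i, hi, hp⟩ | hinf
  · rw [show ("Gracias".toList).length = 7 from by decide] at hi
    interval_cases i <;>
      rcases pvPrefix_append_split hp with h' | ⟨h', h''⟩ <;>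
      first
      | exact absurd h' (by decide)
  · exact hinf


theorem pvLocP1_5 (r : List Char) (h : "muy importantee".toList <:+: ("Por favor".toList ++ r)) :
    "muy importantee".toList <:+: r := by
  rcases pvInfix_cases _ _ _ h with ⟨i, hi, hp⟩ | hinf
  · rw [show ("Por favor".toList).length = 9 from by decide] at hi
    interval_cases i <;>
      rcases pvPrefix_append_split hp with h' | ⟨h', h''⟩ <;>
      first
      | exact absurd h' (by decide)
  · exact hinf


theorem pvLocP1_6 (r : List Char) (h : "muy importantee".toList <:+: ("Disculpe".toList ++ r)) :
    "muy importantee".toList <:+: r := by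
  rcases pvInfix_cases _ _ _ h with ⟨i, hi, hp⟩ | hinf
  · rw [show ("Disculpe".toList).length = 8 from by decide] at hi
    interval_cases i <;>
      rcases pvPrefix_append_split hp with h' | ⟨h', h''⟩ <;>
      first
      | exact absurd h' (by decide)
  · exact hinf


theorem pvLocP1_7 (r : List Char) (h : "muy importantee".toList <:+: ("Perdón".toList ++ r)) :
    "muy importantee".toList <:+: r := by
  rcases pvInfix_cases _ _ _ h with ⟨i, hi, hp⟩ | hinf
  · rw [show ("Perdón".toList).length = 6 from by decide] at hi
    interval_cases i <;>
      rcases pvPrefix_append_split hp with h' | ⟨h', h''⟩ <;>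
      first
      | exact absurd h' (by decide)
  · exact hinf


theorem pvLocP1_8 (r : List Char) (h : "muy importantee".toList <:+: ("muy importante".toList ++ r)) :
    ['e'] <+: r ∨ "muy importantee".toList <:+: r := by
  rcases pvInfix_cases _ _ _ h with ⟨i, hi, hp⟩ | hinf
  · rw [show ("muy importante".toList).length = 14 from by decide] at hi
    interval_cases i <;>
      rcases pvPrefix_append_split hp with h' | ⟨h', h''⟩ <;>
      first
      | exact absurd h' (by decide)
      | exact Or.inl (List.IsPrefix.trans (by decide) h'')
  · exact Or.inr hinf


theorem pvLocP1_9 (r : List Char) (h : "muy importantee".toList <:+: ("importante".toList ++ r)) :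
    "muy importantee".toList <:+: r := by
  rcases pvInfix_cases _ _ _ h with ⟨i, hi, hp⟩ | hinf
  · rw [show ("importante".toList).length = 10 from by decide] at hi
    interval_cases i <;>
      rcases pvPrefix_append_split hp with h' | ⟨h', h''⟩ <;>
      first
      | exact absurd h' (by decide)
  · exact hinf


theorem pvLocP1_10 (r : List Char) (h : "muy importantee".toList <:+: ("recomendado".toList ++ r)) :
    "muy importantee".toList <:+: r := by
  rcases pvInfix_cases _ _ _ h with ⟨i, hi, hp⟩ | hinf
  · rw [show ("recomendado".toList).length = 11 from by decide] at hi
    interval_cases i <;>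
      rcases pvPrefix_append_split hp with h' | ⟨h', h''⟩ <;>
      first
      | exact absurd h' (by decide)
  · exact hinf


theorem pvLocP2_1 (r : List Char) (h : "Estimado/aecomendado".toList <:+: ("Hola".toList ++ r)) :
    "Estimado/aecomendado".toList <:+: r := by
  rcases pvInfix_cases _ _ _ h with ⟨i, hi, hp⟩ | hinf
  · rw [show ("Hola".toList).length = 4 from by decide] at hi
    interval_cases i <;>
      rcases pvPrefix_append_split hp with h' | ⟨h', h''⟩ <;>
      first
      | exact absurd h' (by decide)
  · exact hinf


theorem pvLocP2_2 (r : List Char) (h : "Estimado/aecomendado".toList <:+: ("Estimado/a".toList ++ r)) :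
    "ecomendado".toList <+: r ∨ "Estimado/aecomendado".toList <:+: r := by
  rcases pvInfix_cases _ _ _ h with ⟨i, hi, hp⟩ | hinf
  · rw [show ("Estimado/a".toList).length = 10 from by decide] at hi
    interval_cases i <;>
      rcases pvPrefix_append_split hp with h' | ⟨h', h''⟩ <;>
      first
      | exact absurd h' (by decide)
      | exact Or.inl (List.IsPrefix.trans (by decide) h'')
  · exact Or.inr hinf


theorem pvLocP2_3 (r : List Char) (h : "Estimado/aecomendado".toList <:+: ("Saludos cordiales".toList ++ r)) :
    "Estimado/aecomendado".toList <:+: r := by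
  rcases pvInfix_cases _ _ _ h with ⟨i, hi, hp⟩ | hinf
  · rw [show ("Saludos cordiales".toList).length = 17 from by decide] at hi
    interval_cases i <;>
      rcases pvPrefix_append_split hp with h' | ⟨h', h''⟩ <;>
      first
      | exact absurd h' (by decide)
  · exact hinf


theorem pvLocP2_4 (r : List Char) (h : "Estimado/aecomendado".toList <:+: ("Gracias".toList ++ r)) :
    "Estimado/aecomendado".toList <:+: r := by
  rcases pvInfix_cases _ _ _ h with ⟨i, hi, hp⟩ | hinf
  · rw [show ("Gracias".toList).length = 7 from by decide] at hi
    interval_cases i <;>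
      rcases pvPrefix_append_split hp with h' | ⟨h', h''⟩ <;>
      first
      | exact absurd h' (by decide)
  · exact hinf


theorem pvLocP2_5 (r : List Char) (h : "Estimado/aecomendado".toList <:+: ("Por favor".toList ++ r)) :
    "Estimado/aecomendado".toList <:+: r := by
  rcases pvInfix_cases _ _ _ h with ⟨i, hi, hp⟩ | hinf
  · rw [show ("Por favor".toList).length = 9 from by decide] at hi
    interval_cases i <;>
      rcases pvPrefix_append_split hp with h' | ⟨h', h''⟩ <;>
      first
      | exact absurd h' (by decide)
  · exact hinf


theorem pvLocP2_6 (r : List Char) (h : "Estimado/aecomendado".toList <:+: ("Disculpe".toList ++ r)) :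
    "Estimado/aecomendado".toList <:+: r := by
  rcases pvInfix_cases _ _ _ h with ⟨i, hi, hp⟩ | hinf
  · rw [show ("Disculpe".toList).length = 8 from by decide] at hi
    interval_cases i <;>
      rcases pvPrefix_append_split hp with h' | ⟨h', h''⟩ <;>
      first
      | exact absurd h' (by decide)
  · exact hinf


theorem pvLocP2_7 (r : List Char) (h : "Estimado/aecomendado".toList <:+: ("Perdón".toList ++ r)) :
    "Estimado/aecomendado".toList <:+: r := by
  rcases pvInfix_cases _ _ _ h with ⟨i, hi, hp⟩ | hinf
  · rw [show ("Perdón".toList).length = 6 from by decide] at hi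
    interval_cases i <;>
      rcases pvPrefix_append_split hp with h' | ⟨h', h''⟩ <;>
      first
      | exact absurd h' (by decide)
  · exact hinf


theorem pvLocP2_8 (r : List Char) (h : "Estimado/aecomendado".toList <:+: ("muy importante".toList ++ r)) :
    "Estimado/aecomendado".toList <:+: r := by
  rcases pvInfix_cases _ _ _ h with ⟨i, hi, hp⟩ | hinf
  · rw [show ("muy importante".toList).length = 14 from by decide] at hi
    interval_cases i <;>
      rcases pvPrefix_append_split hp with h' | ⟨h', h''⟩ <;>
      first
      | exact absurd h' (by decide)
  · exact hinf


theorem pvLocP2_9 (r : List Char) (h : "Estimado/aecomendado".toList <:+: ("importante".toList ++ r)) :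
    "Estimado/aecomendado".toList <:+: r := by
  rcases pvInfix_cases _ _ _ h with ⟨i, hi, hp⟩ | hinf
  · rw [show ("importante".toList).length = 10 from by decide] at hi
    interval_cases i <;>
      rcases pvPrefix_append_split hp with h' | ⟨h', h''⟩ <;>
      first
      | exact absurd h' (by decide)
  · exact hinf


theorem pvLocP2_10 (r : List Char) (h : "Estimado/aecomendado".toList <:+: ("recomendado".toList ++ r)) :
    "Estimado/aecomendado".toList <:+: r := by
  rcases pvInfix_cases _ _ _ h with ⟨i, hi, hp⟩ | hinf
  · rw [show ("recomendado".toList).length = 11 from by decide] at hi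
    interval_cases i <;>
      rcases pvPrefix_append_split hp with h' | ⟨h', h''⟩ <;>
      first
      | exact absurd h' (by decide)
  · exact hinf


theorem pvL8e (r : List Char) :
    pvFl ("muy importante".toList ++ 'e' :: r) = "very important".toList ++ pvFl r := by
  simp only [pvFl, pvPairs, List.foldl_cons, List.foldl_nil, pvFrep]
  rw [pvPushStatic "Hola".toList "Hello".toList "muy importante".toList _ (by decide)]
  rw [pvRep_skip _ (pvNotPrefix_headI _ _ _ (by decide) (by decide))]
  rw [pvPushStatic "Estimado/a".toList "Dear".toList "muy importante".toList _ (by decide)]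
  rw [pvRep_skip _ (pvNotPrefix_headI _ _ _ (by decide) (by decide))]
  rw [pvPushStatic "Saludos cordiales".toList "Best regards".toList "muy importante".toList _ (by decide)]
  rw [pvRep_skip _ (pvNotPrefix_headI _ _ _ (by decide) (by decide))]
  rw [pvPushStatic "Gracias".toList "Thank you".toList "muy importante".toList _ (by decide)]
  rw [pvRep_skip _ (pvNotPrefix_headI _ _ _ (by decide) (by decide))]
  rw [pvPushStatic "Por favor".toList "Please".toList "muy importante".toList _ (by decide)]
  rw [pvRep_skip _ (pvNotPrefix_headI _ _ _ (by decide) (by decide))]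
  rw [pvPushStatic "Disculpe".toList "Sorry".toList "muy importante".toList _ (by decide)]
  rw [pvRep_skip _ (pvNotPrefix_headI _ _ _ (by decide) (by decide))]
  rw [pvPushStatic "Perdón".toList "Excuse me".toList "muy importante".toList _ (by decide)]
  rw [pvRep_skip _ (pvNotPrefix_headI _ _ _ (by decide) (by decide))]
  rw [pvRep_match_append "muy importante".toList "very important".toList _ (by decide)]
  rw [pvRep_skip _ (pvNotPrefix_headI _ _ _ (by decide) (by decide))]
  rw [show ∀ W : List Char, "very important".toList ++ 'e' :: W
        = "very ".toList ++ ("importante".toList ++ W) from fun W => by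
      rw [← List.singleton_append, ← List.append_assoc, ← List.append_assoc,
        show "very important".toList ++ ['e'] = "very ".toList ++ "importante".toList from by decide,
        List.append_assoc]]
  rw [pvPushStatic "importante".toList "important".toList "very ".toList _ (by decide)]
  rw [pvRep_match_append "importante".toList "important".toList _ (by decide)]
  rw [pvPushStatic "recomendado".toList "recommended".toList "very ".toList _ (by decide)]
  rw [pvPushStatic "recomendado".toList "recommended".toList "important".toList _ (by decide)]
  rw [show ∀ W : List Char, "very ".toList ++ ("important".toList ++ W)
        = "very important".toList ++ W from fun W => by
      rw [← List.append_assoc,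
        show "very ".toList ++ "important".toList = "very important".toList from by decide]]


theorem pvL2e (r : List Char) :
    pvFl ("Estimado/a".toList ++ ("ecomendado".toList ++ r)) = "Dearecommended".toList ++ pvFl r := by
  simp only [pvFl, pvPairs, List.foldl_cons, List.foldl_nil, pvFrep]
  rw [pvPushStatic "Hola".toList "Hello".toList "Estimado/a".toList _ (by decide)]
  rw [pvPushStatic "Hola".toList "Hello".toList "ecomendado".toList _ (by decide)]
  rw [pvRep_match_append "Estimado/a".toList "Dear".toList _ (by decide)]
  rw [pvPushStatic "Estimado/a".toList "Dear".toList "ecomendado".toList _ (by decide)]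
  rw [pvPushStatic "Saludos cordiales".toList "Best regards".toList "Dear".toList _ (by decide)]
  rw [pvPushStatic "Saludos cordiales".toList "Best regards".toList "ecomendado".toList _ (by decide)]
  rw [pvPushStatic "Gracias".toList "Thank you".toList "Dear".toList _ (by decide)]
  rw [pvPushStatic "Gracias".toList "Thank you".toList "ecomendado".toList _ (by decide)]
  rw [pvPushStatic "Por favor".toList "Please".toList "Dear".toList _ (by decide)]
  rw [pvPushStatic "Por favor".toList "Please".toList "ecomendado".toList _ (by decide)]
  rw [pvPushStatic "Disculpe".toList "Sorry".toList "Dear".toList _ (by decide)]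
  rw [pvPushStatic "Disculpe".toList "Sorry".toList "ecomendado".toList _ (by decide)]
  rw [pvPushStatic "Perdón".toList "Excuse me".toList "Dear".toList _ (by decide)]
  rw [pvPushStatic "Perdón".toList "Excuse me".toList "ecomendado".toList _ (by decide)]
  rw [pvPushStatic "muy importante".toList "very important".toList "Dear".toList _ (by decide)]
  rw [pvPushStatic "muy importante".toList "very important".toList "ecomendado".toList _ (by decide)]
  rw [pvPushStatic "importante".toList "important".toList "Dear".toList _ (by decide)]
  rw [pvPushStatic "importante".toList "important".toList "ecomendado".toList _ (by decide)]
  rw [show ∀ W : List Char, "Dear".toList ++ ("ecomendado".toList ++ W)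
        = "Dea".toList ++ ("recomendado".toList ++ W) from fun W => by
      rw [← List.append_assoc, ← List.append_assoc,
        show "Dear".toList ++ "ecomendado".toList = "Dea".toList ++ "recomendado".toList from by decide,
        List.append_assoc]]
  rw [pvPushStatic "recomendado".toList "recommended".toList "Dea".toList _ (by decide)]
  rw [pvRep_match_append "recomendado".toList "recommended".toList _ (by decide)]
  rw [show ∀ W : List Char, "Dea".toList ++ ("recommended".toList ++ W)
        = "Dearecommended".toList ++ W from fun W => by
      rw [← List.append_assoc,
        show "Dea".toList ++ "recommended".toList = "Dearecommended".toList from by decide]]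


theorem pvFind_e_none (w : List Char) : pvFind ('e' :: w) pvPairs = none := by
  refine pvFind_noneL _ _ (fun kv hm => ?_)
  fin_cases hm <;> exact pvNotPrefix_headI _ _ _ (by decide) (by decide)

theorem pvScan_e (w : List Char) : pvScan ('e' :: w) = 'e' :: pvScan w :=
  pvScan_eq_none (pvFind_e_none w)


theorem pvScanE (w : List Char) : pvScan ("ecomendado".toList ++ w) = "ecomendado".toList ++ pvScan w := by
  rw [show "ecomendado".toList = ['e','c','o','m','e','n','d','a','d','o'] from by decide]
  simp only [List.cons_append, List.nil_append]
  rw [pvScan_eq_none (pvFind_noneL ('e' :: 'c' :: 'o' :: 'm' :: 'e' :: 'n' :: 'd' :: 'a' :: 'd' :: 'o' :: w) pvPairs (fun kv hm => by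
    fin_cases hm <;> exact pvNotPrefix_headI _ _ _ (by decide) (by decide)))]
  rw [pvScan_eq_none (pvFind_noneL ('c' :: 'o' :: 'm' :: 'e' :: 'n' :: 'd' :: 'a' :: 'd' :: 'o' :: w) pvPairs (fun kv hm => by
    fin_cases hm <;> exact pvNotPrefix_headI _ _ _ (by decide) (by decide)))]
  rw [pvScan_eq_none (pvFind_noneL ('o' :: 'm' :: 'e' :: 'n' :: 'd' :: 'a' :: 'd' :: 'o' :: w) pvPairs (fun kv hm => by
    fin_cases hm <;> exact pvNotPrefix_headI _ _ _ (by decide) (by decide)))]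
  rw [pvScan_eq_none (pvFind_noneL ('m' :: 'e' :: 'n' :: 'd' :: 'a' :: 'd' :: 'o' :: w) pvPairs (fun kv hm => by
    fin_cases hm <;>
      first
      | exact pvNotPrefix_headI _ _ _ (by decide) (by decide)
      | exact pvNotPre2 (show "muy importante".toList = 'm' :: 'u' :: "y importante".toList from by decide) (by decide) _ _))]
  rw [pvScan_eq_none (pvFind_noneL ('e' :: 'n' :: 'd' :: 'a' :: 'd' :: 'o' :: w) pvPairs (fun kv hm => by
    fin_cases hm <;> exact pvNotPrefix_headI _ _ _ (by decide) (by decide)))]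
  rw [pvScan_eq_none (pvFind_noneL ('n' :: 'd' :: 'a' :: 'd' :: 'o' :: w) pvPairs (fun kv hm => by
    fin_cases hm <;> exact pvNotPrefix_headI _ _ _ (by decide) (by decide)))]
  rw [pvScan_eq_none (pvFind_noneL ('d' :: 'a' :: 'd' :: 'o' :: w) pvPairs (fun kv hm => by
    fin_cases hm <;> exact pvNotPrefix_headI _ _ _ (by decide) (by decide)))]
  rw [pvScan_eq_none (pvFind_noneL ('a' :: 'd' :: 'o' :: w) pvPairs (fun kv hm => by
    fin_cases hm <;> exact pvNotPrefix_headI _ _ _ (by decide) (by decide)))]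
  rw [pvScan_eq_none (pvFind_noneL ('d' :: 'o' :: w) pvPairs (fun kv hm => by
    fin_cases hm <;> exact pvNotPrefix_headI _ _ _ (by decide) (by decide)))]
  rw [pvScan_eq_none (pvFind_noneL ('o' :: w) pvPairs (fun kv hm => by
    fin_cases hm <;> exact pvNotPrefix_headI _ _ _ (by decide) (by decide)))]

theorem pvLskip_e (w : List Char) : pvFl ('e' :: w) = 'e' :: pvFl w := by
  refine pvLskip 'e' w (fun kv hm => ?_)
  fin_cases hm <;> exact pvNotPrefix_headI _ _ _ (by decide) (by decide)

theorem pvNOE : ∀ w : List Char, pvFl w ≠ 'e' :: pvScan w := by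
  intro w
  induction w with
  | nil => rw [pvFl_nil]; simp
  | cons c w' ih =>
    intro h
    have hpre : ['e'] <+: pvFl (c :: w') := by rw [h]; exact ⟨pvScan (c :: w'), rfl⟩
    have hec : ['e'] <+: (c :: w') := pvChain pvPairs (by decide) _ hpre
    obtain ⟨rfl⟩ : c = 'e' := by simpa using (List.cons_prefix_cons.mp hec).1.symm
    rw [pvLskip_e, pvScan_e] at h
    exact ih (by simpa using h)


theorem pvMainNe : ∀ t, ¬ pvGood t → pvFl t ≠ pvScan t := by
  intro t
  induction t using pvScan.induct with
  | case1 =>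
    intro hb
    exact absurd ⟨by simp [List.infix_nil], by simp [List.infix_nil]⟩ hb
  | case2 c t kv hfind ih =>
    intro hb
    have hor : "muy importantee".toList <:+: (c :: t) ∨ "Estimado/aecomendado".toList <:+: (c :: t) := by
      rcases not_and_or.mp hb with h | h
      · exact Or.inl (not_not.mp h)
      · exact Or.inr (not_not.mp h)
    simp only [pvFind, pvPairs] at hfind
    by_cases h1 : "Hola".toList <+: (c :: t)
    · obtain rfl : kv = ("Hola".toList, "Hello".toList) := by
        rw [if_pos (by simpa [List.isPrefixOf_iff_prefix] using h1)] at hfind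
        injection hfind with hkv
        exact hkv.symm
      obtain ⟨r, hr⟩ := h1
      have hdr : (c :: t).drop ("Hola".toList).length = r := by rw [← hr, List.drop_left]
      rw [hdr] at ih
      have hbr : ¬ pvGood r := by
        rcases hor with h | h
        · exact fun hg => hg.1 (pvLocP1_1 r (by rwa [hr]))
        · exact fun hg => hg.2 (pvLocP2_1 r (by rwa [hr]))
      rw [pvScan_eq_some hfind, hdr, ← hr, pvL1 r]
      intro heq
      exact ih hbr (List.append_cancel_left heq)
    by_cases h2 : "Estimado/a".toList <+: (c :: t)
    · obtain rfl : kv = ("Estimado/a".toList, "Dear".toList) := by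
        rw [if_neg (by simpa [List.isPrefixOf_iff_prefix] using h1)] at hfind
        rw [if_pos (by simpa [List.isPrefixOf_iff_prefix] using h2)] at hfind
        injection hfind with hkv
        exact hkv.symm
      obtain ⟨r, hr⟩ := h2
      have hdr : (c :: t).drop ("Estimado/a".toList).length = r := by rw [← hr, List.drop_left]
      rw [hdr] at ih
      by_cases hcd : "ecomendado".toList <+: r
      · obtain ⟨r2, hr2⟩ := hcd
        rw [pvScan_eq_some hfind, hdr, ← hr, ← hr2, pvL2e, pvScanE]
        intro heq
        have h8 := congrArg (fun l => l[8]?) heq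
        rw [show "Dearecommended".toList = ['D','e','a','r','e','c','o','m','m','e','n','d','e','d'] from by decide,
          show "Dear".toList = ['D','e','a','r'] from by decide,
          show "ecomendado".toList = ['e','c','o','m','e','n','d','a','d','o'] from by decide] at h8
        simp at h8
      · have hbr : ¬ pvGood r := by
          rcases hor with h | h
          · exact fun hg => hg.1 (pvLocP1_2 r (by rwa [hr]))
          · rcases pvLocP2_2 r (by rwa [hr]) with h2 | h2
            · exact absurd h2 hcd
            · exact fun hg => hg.2 h2
        rw [pvScan_eq_some hfind, hdr, ← hr, pvL2 r hcd]
        intro heq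
        exact ih hbr (List.append_cancel_left heq)
    by_cases h3 : "Saludos cordiales".toList <+: (c :: t)
    · obtain rfl : kv = ("Saludos cordiales".toList, "Best regards".toList) := by
        rw [if_neg (by simpa [List.isPrefixOf_iff_prefix] using h1)] at hfind
        rw [if_neg (by simpa [List.isPrefixOf_iff_prefix] using h2)] at hfind
        rw [if_pos (by simpa [List.isPrefixOf_iff_prefix] using h3)] at hfind
        injection hfind with hkv
        exact hkv.symm
      obtain ⟨r, hr⟩ := h3
      have hdr : (c :: t).drop ("Saludos cordiales".toList).length = r := by rw [← hr, List.drop_left]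
      rw [hdr] at ih
      have hbr : ¬ pvGood r := by
        rcases hor with h | h
        · exact fun hg => hg.1 (pvLocP1_3 r (by rwa [hr]))
        · exact fun hg => hg.2 (pvLocP2_3 r (by rwa [hr]))
      rw [pvScan_eq_some hfind, hdr, ← hr, pvL3 r]
      intro heq
      exact ih hbr (List.append_cancel_left heq)
    by_cases h4 : "Gracias".toList <+: (c :: t)
    · obtain rfl : kv = ("Gracias".toList, "Thank you".toList) := by
        rw [if_neg (by simpa [List.isPrefixOf_iff_prefix] using h1)] at hfind
        rw [if_neg (by simpa [List.isPrefixOf_iff_prefix] using h2)] at hfind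
        rw [if_neg (by simpa [List.isPrefixOf_iff_prefix] using h3)] at hfind
        rw [if_pos (by simpa [List.isPrefixOf_iff_prefix] using h4)] at hfind
        injection hfind with hkv
        exact hkv.symm
      obtain ⟨r, hr⟩ := h4
      have hdr : (c :: t).drop ("Gracias".toList).length = r := by rw [← hr, List.drop_left]
      rw [hdr] at ih
      have hbr : ¬ pvGood r := by
        rcases hor with h | h
        · exact fun hg => hg.1 (pvLocP1_4 r (by rwa [hr]))
        · exact fun hg => hg.2 (pvLocP2_4 r (by rwa [hr]))
      rw [pvScan_eq_some hfind, hdr, ← hr, pvL4 r]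
      intro heq
      exact ih hbr (List.append_cancel_left heq)
    by_cases h5 : "Por favor".toList <+: (c :: t)
    · obtain rfl : kv = ("Por favor".toList, "Please".toList) := by
        rw [if_neg (by simpa [List.isPrefixOf_iff_prefix] using h1)] at hfind
        rw [if_neg (by simpa [List.isPrefixOf_iff_prefix] using h2)] at hfind
        rw [if_neg (by simpa [List.isPrefixOf_iff_prefix] using h3)] at hfind
        rw [if_neg (by simpa [List.isPrefixOf_iff_prefix] using h4)] at hfind
        rw [if_pos (by simpa [List.isPrefixOf_iff_prefix] using h5)] at hfind
        injection hfind with hkv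
        exact hkv.symm
      obtain ⟨r, hr⟩ := h5
      have hdr : (c :: t).drop ("Por favor".toList).length = r := by rw [← hr, List.drop_left]
      rw [hdr] at ih
      have hbr : ¬ pvGood r := by
        rcases hor with h | h
        · exact fun hg => hg.1 (pvLocP1_5 r (by rwa [hr]))
        · exact fun hg => hg.2 (pvLocP2_5 r (by rwa [hr]))
      rw [pvScan_eq_some hfind, hdr, ← hr, pvL5 r]
      intro heq
      exact ih hbr (List.append_cancel_left heq)
    by_cases h6 : "Disculpe".toList <+: (c :: t)
    · obtain rfl : kv = ("Disculpe".toList, "Sorry".toList) := by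
        rw [if_neg (by simpa [List.isPrefixOf_iff_prefix] using h1)] at hfind
        rw [if_neg (by simpa [List.isPrefixOf_iff_prefix] using h2)] at hfind
        rw [if_neg (by simpa [List.isPrefixOf_iff_prefix] using h3)] at hfind
        rw [if_neg (by simpa [List.isPrefixOf_iff_prefix] using h4)] at hfind
        rw [if_neg (by simpa [List.isPrefixOf_iff_prefix] using h5)] at hfind
        rw [if_pos (by simpa [List.isPrefixOf_iff_prefix] using h6)] at hfind
        injection hfind with hkv
        exact hkv.symm
      obtain ⟨r, hr⟩ := h6
      have hdr : (c :: t).drop ("Disculpe".toList).length = r := by rw [← hr, List.drop_left]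
      rw [hdr] at ih
      have hbr : ¬ pvGood r := by
        rcases hor with h | h
        · exact fun hg => hg.1 (pvLocP1_6 r (by rwa [hr]))
        · exact fun hg => hg.2 (pvLocP2_6 r (by rwa [hr]))
      rw [pvScan_eq_some hfind, hdr, ← hr, pvL6 r]
      intro heq
      exact ih hbr (List.append_cancel_left heq)
    by_cases h7 : "Perdón".toList <+: (c :: t)
    · obtain rfl : kv = ("Perdón".toList, "Excuse me".toList) := by
        rw [if_neg (by simpa [List.isPrefixOf_iff_prefix] using h1)] at hfind
        rw [if_neg (by simpa [List.isPrefixOf_iff_prefix] using h2)] at hfind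
        rw [if_neg (by simpa [List.isPrefixOf_iff_prefix] using h3)] at hfind
        rw [if_neg (by simpa [List.isPrefixOf_iff_prefix] using h4)] at hfind
        rw [if_neg (by simpa [List.isPrefixOf_iff_prefix] using h5)] at hfind
        rw [if_neg (by simpa [List.isPrefixOf_iff_prefix] using h6)] at hfind
        rw [if_pos (by simpa [List.isPrefixOf_iff_prefix] using h7)] at hfind
        injection hfind with hkv
        exact hkv.symm
      obtain ⟨r, hr⟩ := h7
      have hdr : (c :: t).drop ("Perdón".toList).length = r := by rw [← hr, List.drop_left]
      rw [hdr] at ih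
      have hbr : ¬ pvGood r := by
        rcases hor with h | h
        · exact fun hg => hg.1 (pvLocP1_7 r (by rwa [hr]))
        · exact fun hg => hg.2 (pvLocP2_7 r (by rwa [hr]))
      rw [pvScan_eq_some hfind, hdr, ← hr, pvL7 r]
      intro heq
      exact ih hbr (List.append_cancel_left heq)
    by_cases h8 : "muy importante".toList <+: (c :: t)
    · obtain rfl : kv = ("muy importante".toList, "very important".toList) := by
        rw [if_neg (by simpa [List.isPrefixOf_iff_prefix] using h1)] at hfind
        rw [if_neg (by simpa [List.isPrefixOf_iff_prefix] using h2)] at hfind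
        rw [if_neg (by simpa [List.isPrefixOf_iff_prefix] using h3)] at hfind
        rw [if_neg (by simpa [List.isPrefixOf_iff_prefix] using h4)] at hfind
        rw [if_neg (by simpa [List.isPrefixOf_iff_prefix] using h5)] at hfind
        rw [if_neg (by simpa [List.isPrefixOf_iff_prefix] using h6)] at hfind
        rw [if_neg (by simpa [List.isPrefixOf_iff_prefix] using h7)] at hfind
        rw [if_pos (by simpa [List.isPrefixOf_iff_prefix] using h8)] at hfind
        injection hfind with hkv
        exact hkv.symm
      obtain ⟨r, hr⟩ := h8
      have hdr : (c :: t).drop ("muy importante".toList).length = r := by rw [← hr, List.drop_left]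
      rw [hdr] at ih
      by_cases hce : ['e'] <+: r
      · obtain ⟨r2, hr2⟩ := hce
        rw [List.singleton_append] at hr2
        rw [pvScan_eq_some hfind, hdr, ← hr, ← hr2, pvL8e, pvScan_e]
        intro heq
        exact pvNOE r2 (List.append_cancel_left heq)
      · have hbr : ¬ pvGood r := by
          rcases hor with h | h
          · rcases pvLocP1_8 r (by rwa [hr]) with h2 | h2
            · exact absurd h2 hce
            · exact fun hg => hg.1 h2
          · exact fun hg => hg.2 (pvLocP2_8 r (by rwa [hr]))
        rw [pvScan_eq_some hfind, hdr, ← hr, pvL8 r hce]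
        intro heq
        exact ih hbr (List.append_cancel_left heq)
    by_cases h9 : "importante".toList <+: (c :: t)
    · obtain rfl : kv = ("importante".toList, "important".toList) := by
        rw [if_neg (by simpa [List.isPrefixOf_iff_prefix] using h1)] at hfind
        rw [if_neg (by simpa [List.isPrefixOf_iff_prefix] using h2)] at hfind
        rw [if_neg (by simpa [List.isPrefixOf_iff_prefix] using h3)] at hfind
        rw [if_neg (by simpa [List.isPrefixOf_iff_prefix] using h4)] at hfind
        rw [if_neg (by simpa [List.isPrefixOf_iff_prefix] using h5)] at hfind
        rw [if_neg (by simpa [List.isPrefixOf_iff_prefix] using h6)] at hfind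
        rw [if_neg (by simpa [List.isPrefixOf_iff_prefix] using h7)] at hfind
        rw [if_neg (by simpa [List.isPrefixOf_iff_prefix] using h8)] at hfind
        rw [if_pos (by simpa [List.isPrefixOf_iff_prefix] using h9)] at hfind
        injection hfind with hkv
        exact hkv.symm
      obtain ⟨r, hr⟩ := h9
      have hdr : (c :: t).drop ("importante".toList).length = r := by rw [← hr, List.drop_left]
      rw [hdr] at ih
      have hbr : ¬ pvGood r := by
        rcases hor with h | h
        · exact fun hg => hg.1 (pvLocP1_9 r (by rwa [hr]))
        · exact fun hg => hg.2 (pvLocP2_9 r (by rwa [hr]))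
      rw [pvScan_eq_some hfind, hdr, ← hr, pvL9 r]
      intro heq
      exact ih hbr (List.append_cancel_left heq)
    by_cases h10 : "recomendado".toList <+: (c :: t)
    · obtain rfl : kv = ("recomendado".toList, "recommended".toList) := by
        rw [if_neg (by simpa [List.isPrefixOf_iff_prefix] using h1)] at hfind
        rw [if_neg (by simpa [List.isPrefixOf_iff_prefix] using h2)] at hfind
        rw [if_neg (by simpa [List.isPrefixOf_iff_prefix] using h3)] at hfind
        rw [if_neg (by simpa [List.isPrefixOf_iff_prefix] using h4)] at hfind
        rw [if_neg (by simpa [List.isPrefixOf_iff_prefix] using h5)] at hfind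
        rw [if_neg (by simpa [List.isPrefixOf_iff_prefix] using h6)] at hfind
        rw [if_neg (by simpa [List.isPrefixOf_iff_prefix] using h7)] at hfind
        rw [if_neg (by simpa [List.isPrefixOf_iff_prefix] using h8)] at hfind
        rw [if_neg (by simpa [List.isPrefixOf_iff_prefix] using h9)] at hfind
        rw [if_pos (by simpa [List.isPrefixOf_iff_prefix] using h10)] at hfind
        injection hfind with hkv
        exact hkv.symm
      obtain ⟨r, hr⟩ := h10
      have hdr : (c :: t).drop ("recomendado".toList).length = r := by rw [← hr, List.drop_left]
      rw [hdr] at ih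
      have hbr : ¬ pvGood r := by
        rcases hor with h | h
        · exact fun hg => hg.1 (pvLocP1_10 r (by rwa [hr]))
        · exact fun hg => hg.2 (pvLocP2_10 r (by rwa [hr]))
      rw [pvScan_eq_some hfind, hdr, ← hr, pvL10 r]
      intro heq
      exact ih hbr (List.append_cancel_left heq)
    rw [if_neg (by simpa [List.isPrefixOf_iff_prefix] using h1)] at hfind
    rw [if_neg (by simpa [List.isPrefixOf_iff_prefix] using h2)] at hfind
    rw [if_neg (by simpa [List.isPrefixOf_iff_prefix] using h3)] at hfind
    rw [if_neg (by simpa [List.isPrefixOf_iff_prefix] using h4)] at hfind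
    rw [if_neg (by simpa [List.isPrefixOf_iff_prefix] using h5)] at hfind
    rw [if_neg (by simpa [List.isPrefixOf_iff_prefix] using h6)] at hfind
    rw [if_neg (by simpa [List.isPrefixOf_iff_prefix] using h7)] at hfind
    rw [if_neg (by simpa [List.isPrefixOf_iff_prefix] using h8)] at hfind
    rw [if_neg (by simpa [List.isPrefixOf_iff_prefix] using h9)] at hfind
    rw [if_neg (by simpa [List.isPrefixOf_iff_prefix] using h10)] at hfind
    cases hfind
  | case3 c t hfind ih =>
    intro hb
    have hnk := pvFind_none hfind
    have hbt : ¬ pvGood t := by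
      rcases not_and_or.mp hb with h | h
      · obtain ⟨x, y, hxy⟩ := not_not.mp h
        cases x with
        | nil =>
          exfalso
          refine hnk ("muy importante".toList, "very important".toList) (by decide) ?_
          refine List.IsPrefix.trans (by decide) (⟨y, ?_⟩ : "muy importantee".toList <+: (c :: t))
          simpa using hxy
        | cons a x' =>
          refine fun hg => hg.1 ⟨x', y, ?_⟩
          have := hxy
          simp only [List.cons_append] at this
          exact (List.cons.injEq _ _ _ _).mp this |>.2
      · obtain ⟨x, y, hxy⟩ := not_not.mp h
        cases x with
        | nil =>
          exfalso
          refine hnk ("Estimado/a".toList, "Dear".toList) (by decide) ?_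
          refine List.IsPrefix.trans (by decide) (⟨y, ?_⟩ : "Estimado/aecomendado".toList <+: (c :: t))
          simpa using hxy
        | cons a x' =>
          refine fun hg => hg.2 ⟨x', y, ?_⟩
          have := hxy
          simp only [List.cons_append] at this
          exact (List.cons.injEq _ _ _ _).mp this |>.2
    rw [pvScan_eq_none hfind, pvLskip c t hnk]
    intro heq
    exact ih hbt (by simpa using heq)

-- ===== VERDICT (by name: the statement is the Claim_ definition above) =====
theorem apply_english_cultural_adaptations_py_spec : Claim_unchanged_apply_english_cultural_adaptations_py := by
  intro content _ hnd
  have hg : pvGood content.toList := by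
    constructor
    · exact fun h => hnd (Or.inl ((PySem.Str.isIn_iff_infix _ _).mpr h))
    · exact fun h => hnd (Or.inr ((PySem.Str.isIn_iff_infix _ _).mpr h))
  rw [apply_english_cultural_adaptations_py_alt, ← pvMain content.toList hg, ← pvA_toList]
  exact String.ofList_toList.symm

set_option maxRecDepth 100000 in
theorem apply_english_cultural_adaptations_py_changed : Claim_changed_apply_english_cultural_adaptations_py := by
  unfold Claim_changed_apply_english_cultural_adaptations_py
  refine ⟨by decide, by decide, by decide, ?_, by decide⟩
  have h : pvScan "muy importantee".toList = "very importante".toList := by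
    simp [pvScan, pvFind, pvPairs]
  simp only [apply_english_cultural_adaptations_py_alt,
    pvDiffWitness_apply_english_cultural_adaptations_py,
    pvDiffWitnessOut_apply_english_cultural_adaptations_py, h]
  decide

theorem apply_english_cultural_adaptations_py_tight : Claim_exact_apply_english_cultural_adaptations_py := by
  intro content _ hD heq
  have hb : ¬ pvGood content.toList := by
    intro hg
    rcases hD with h | h
    · exact hg.1 ((PySem.Str.isIn_iff_infix _ _).mp h)
    · exact hg.2 ((PySem.Str.isIn_iff_infix _ _).mp h)
  refine pvMainNe content.toList hb ?_
  have h1 := congrArg String.toList heq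
  rw [pvA_toList] at h1
  rw [h1, apply_english_cultural_adaptations_py_alt, String.toList_ofList]
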